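-- pv_equiv track=rewrite | github.com/diegoami/DA_geekproblems | general/platforms.py | prepr
-- ===== SOURCE A (Python) =====
-- def prepr(ld, la):
--     hc, mc = 0, 0
--     dd = 0
--     od, oa = [], []
--     for i,l in enumerate(ld):
--         hd, md = l // 100, l % 100
--         ha, ma = la[i] // 100, la[i] % 100
--         if hd < hc:
--             dd = dd + 1
--         td, ta = (dd*24+hd)*60+md, (dd * 24 + ha) * 60 + ma
--         while td > ta:
--             ta = ta + 24*60
--         od.append(td)
--         oa.append(ta)
--
--         hc, mc = hd, md
--
--     return od, oa
-- ===== SOURCE B (Python) =====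
-- def prepr(ld, la):
--     # Two-pass decomposition: precompute hour list and a day-offset prefix table,
--     # then map over zip; the multi-step while is replaced by one ceil-division add.
--     hds = [l // 100 for l in ld]
--     days = []
--     t = 0
--     for p, h in zip([0] + hds, hds):
--         t += 1 if h < p else 0
--         days.append(t)
--     od, oa = [], []
--     for d, (l, a) in zip(days, zip(ld, la)):
--         td = (d * 24 + l // 100) * 60 + l % 100
--         ta = (d * 24 + a // 100) * 60 + a % 100
--         ta += 1440 * max(0, -((ta - td) // 1440))
--         od.append(td)
--         oa.append(ta)
--     return od, oa
-- ===== Notes on version B (the rewrite author's own statement) =====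
-- stated objective: alternative
-- what changed: Replaces A's single stateful loop by a two-pass decomposition (precomputed hour list and day-offset prefix table, then a zip pass) and replaces the repeated while-add of 1440 by a single ceiling-division add.
import Mathlib
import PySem

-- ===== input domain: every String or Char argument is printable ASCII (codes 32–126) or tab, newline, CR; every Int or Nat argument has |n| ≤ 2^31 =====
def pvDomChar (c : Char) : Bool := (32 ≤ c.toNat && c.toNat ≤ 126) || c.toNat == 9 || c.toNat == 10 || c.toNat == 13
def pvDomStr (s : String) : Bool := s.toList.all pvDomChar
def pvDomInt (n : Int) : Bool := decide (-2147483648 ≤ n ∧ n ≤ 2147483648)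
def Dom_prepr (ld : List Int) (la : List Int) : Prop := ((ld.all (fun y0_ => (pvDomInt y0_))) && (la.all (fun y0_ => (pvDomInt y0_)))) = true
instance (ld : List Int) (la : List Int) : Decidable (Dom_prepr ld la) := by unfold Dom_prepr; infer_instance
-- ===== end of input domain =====

-- B replaces A's single stateful loop by a two-pass decomposition (hour list + day-offset
-- prefix table, then a zip pass) and replaces the repeated while-add by one ceiling-division add.
-- Objective: alternative (same asymptotic cost, different structure).

-- ===== PORT A =====
-- the 'while td > ta: ta = ta + 24*60' loop of A, with structurally-recursive fuel;
-- (td - ta).toNat bounds the iteration count since each pass adds 1440 ≥ 1 to ta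
def preprWhileFuel : Nat → Int → Int → Int
  | 0, _, ta => ta
  | n+1, td, ta => if td > ta then preprWhileFuel n td (ta + 24*60) else ta

def preprWhile (td ta : Int) : Int := preprWhileFuel (td - ta).toNat td ta

-- the body of A's 'for i,l in enumerate(ld)' loop; state = (hc, mc, dd, od, oa)
def preprStep (la : List Int) (s : Int × Int × Int × List Int × List Int) (p : Int × Int) :
    Int × Int × Int × List Int × List Int :=
  let hc := s.1
  let dd := s.2.2.1
  let od := s.2.2.2.1
  let oa := s.2.2.2.2
  let l := p.2
  let hd := PySem.Int.floordiv l 100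
  let md := PySem.Int.mod l 100
  -- la[i]: Python raises IndexError when out of range (excluded by Pre_); getD 0 stands in
  let ai := (PySem.List.pyGet? la p.1).getD 0
  let ha := PySem.Int.floordiv ai 100
  let ma := PySem.Int.mod ai 100
  let dd := if hd < hc then dd + 1 else dd
  let td := (dd*24+hd)*60+md
  let ta := (dd*24+ha)*60+ma
  let ta := preprWhile td ta
  (hd, md, dd, od ++ [td], oa ++ [ta])

def prepr (ld : List Int) (la : List Int) : List Int × List Int :=
  let st := (PySem.List.enumerate ld 0).foldl (preprStep la)
    (0, 0, 0, ([] : List Int), ([] : List Int))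
  (st.2.2.2.1, st.2.2.2.2)

-- ===== PORT B =====
-- body of B's day-offset accumulation loop; state = (t, days)
def altDayStep (acc : Int × List Int) (pr : Int × Int) : Int × List Int :=
  let t := acc.1 + (if pr.2 < pr.1 then 1 else 0)
  (t, acc.2 ++ [t])

-- body of B's zip pass; state = (od, oa)
def altStep (acc : List Int × List Int) (x : Int × (Int × Int)) : List Int × List Int :=
  let d := x.1
  let l := x.2.1
  let a := x.2.2
  let td := (d * 24 + PySem.Int.floordiv l 100) * 60 + PySem.Int.mod l 100
  let ta := (d * 24 + PySem.Int.floordiv a 100) * 60 + PySem.Int.mod a 100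
  let ta := ta + 1440 * max 0 (-(PySem.Int.floordiv (ta - td) 1440))
  (acc.1 ++ [td], acc.2 ++ [ta])

def prepr_alt (ld : List Int) (la : List Int) : List Int × List Int :=
  let hds := ld.map (fun l => PySem.Int.floordiv l 100)
  let days := ((List.zip (0 :: hds) hds).foldl altDayStep (0, ([] : List Int))).2
  (List.zip days (List.zip ld la)).foldl altStep (([] : List Int), ([] : List Int))

-- ===== PRECONDITION & SPEC =====
-- Pre_ excludes exactly the inputs where A raises IndexError: la shorter than ld.
def Pre_prepr (ld : List Int) (la : List Int) : Prop := ld.length ≤ la.length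
instance (ld : List Int) (la : List Int) : Decidable (Pre_prepr ld la) := by unfold Pre_prepr; infer_instance
def pvWitness_prepr : List Int × List Int := ([930, 1020, 50], [1010, 1100, 120])

def Spec_prepr (ld : List Int) (la : List Int) (out : List Int × List Int) : Prop := out = prepr_alt ld la
instance (ld : List Int) (la : List Int) (out : List Int × List Int) : Decidable (Spec_prepr ld la out) := by unfold Spec_prepr; infer_instance

-- ===== CLAIM (what is proved, stated in full; the proofs are below) =====
def Claim_equal_prepr : Prop := ∀ (ld : List Int) (la : List Int), Dom_prepr ld la → Pre_prepr ld la → Spec_prepr ld la (prepr ld la)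

-- ===== LEMMAS AND PROOFS =====

-- common reference recursion: both ports compute 'go 0 0 ld la' componentwise
def go (hc dd : Int) : List Int → List Int → List Int × List Int
  | [], _ => ([], [])
  | _ :: _, [] => ([], [])
  | l :: ld, a :: la =>
    let hd := PySem.Int.floordiv l 100
    let md := PySem.Int.mod l 100
    let ha := PySem.Int.floordiv a 100
    let ma := PySem.Int.mod a 100
    let dd := if hd < hc then dd + 1 else dd
    let td := (dd*24+hd)*60+md
    let ta := preprWhile td ((dd*24+ha)*60+ma)
    let r := go hd dd ld la
    (td :: r.1, ta :: r.2)

-- A's while-loop equals one ceiling-division add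
theorem preprWhileFuel_eq (n : Nat) : ∀ (td ta : Int), (td - ta).toNat ≤ n →
    preprWhileFuel n td ta = ta + 1440 * max 0 (-(PySem.Int.floordiv (ta - td) 1440)) := by
  induction n with
  | zero =>
    intro td ta h
    rw [PySem.Int.floordiv_eq_ediv_of_pos (by norm_num : (0:Int) < 1440)]
    simp only [preprWhileFuel]
    omega
  | succ n ih =>
    intro td ta h
    simp only [preprWhileFuel]
    split
    · rw [ih td (ta + 24*60) (by omega)]
      rw [PySem.Int.floordiv_eq_ediv_of_pos (by norm_num : (0:Int) < 1440),
          PySem.Int.floordiv_eq_ediv_of_pos (by norm_num : (0:Int) < 1440)]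
      omega
    · rw [PySem.Int.floordiv_eq_ediv_of_pos (by norm_num : (0:Int) < 1440)]
      omega

theorem preprWhile_eq (td ta : Int) :
    preprWhile td ta = ta + 1440 * max 0 (-(PySem.Int.floordiv (ta - td) 1440)) :=
  preprWhileFuel_eq _ td ta le_rfl

-- A's fold from index la1.length over la1 ++ la2 computes go over la2
theorem A_loop (xs : List Int) : ∀ (la1 la2 : List Int) (hc mc dd : Int) (od oa : List Int),
    xs.length ≤ la2.length →
    ((PySem.List.enumerate xs (la1.length : Int)).foldl (preprStep (la1 ++ la2)) (hc, mc, dd, od, oa)).2.2.2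
      = (od ++ (go hc dd xs la2).1, oa ++ (go hc dd xs la2).2) := by
  induction xs with
  | nil => intro la1 la2 hc mc dd od oa _; simp [PySem.List.enumerate, go]
  | cons x xs ih =>
    intro la1 la2 hc mc dd od oa hlen
    match la2 with
    | [] => simp at hlen
    | a :: la2' =>
      rw [PySem.List.enumerate_cons, List.foldl_cons]
      have hstep : preprStep (la1 ++ a :: la2') (hc, mc, dd, od, oa) ((la1.length : Int), x)
          = (PySem.Int.floordiv x 100, PySem.Int.mod x 100,
             (if PySem.Int.floordiv x 100 < hc then dd + 1 else dd),
             od ++ [((if PySem.Int.floordiv x 100 < hc then dd + 1 else dd)*24+PySem.Int.floordiv x 100)*60+PySem.Int.mod x 100],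
             oa ++ [preprWhile (((if PySem.Int.floordiv x 100 < hc then dd + 1 else dd)*24+PySem.Int.floordiv x 100)*60+PySem.Int.mod x 100)
                      (((if PySem.Int.floordiv x 100 < hc then dd + 1 else dd)*24+PySem.Int.floordiv a 100)*60+PySem.Int.mod a 100)]) := by
        simp [preprStep]
      rw [hstep]
      have hidx : (la1.length : Int) + 1 = ((la1 ++ [a]).length : Int) := by
        simp
      have hcat : la1 ++ a :: la2' = (la1 ++ [a]) ++ la2' := by simp
      rw [hidx, hcat, ih (la1 ++ [a]) la2' _ _ _ _ _ (by simpa using hlen)]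
      simp [go]

-- B's day-accumulation fold computes the dayList scan
def dayList (t p : Int) : List Int → List Int
  | [] => []
  | h :: hs => (t + (if h < p then 1 else 0)) :: dayList (t + (if h < p then 1 else 0)) h hs

theorem days_fold (hs : List Int) : ∀ (t p : Int) (acc : List Int),
    ((List.zip (p :: hs) hs).foldl altDayStep (t, acc)).2 = acc ++ dayList t p hs := by
  induction hs with
  | nil => intro t p acc; simp [dayList]
  | cons h hs ih =>
    intro t p acc
    simp only [List.zip_cons_cons, List.foldl_cons, dayList]
    rw [show altDayStep (t, acc) (p, h) = (t + (if h < p then 1 else 0), acc ++ [t + (if h < p then 1 else 0)]) from rfl]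
    rw [ih]
    simp

-- B's zip pass over the dayList computes go
theorem B_loop (ld : List Int) : ∀ (la : List Int) (t p : Int) (acc1 acc2 : List Int),
    (List.zip (dayList t p (ld.map (fun l => PySem.Int.floordiv l 100))) (List.zip ld la)).foldl
        altStep (acc1, acc2)
      = (acc1 ++ (go p t ld la).1, acc2 ++ (go p t ld la).2) := by
  induction ld with
  | nil => intro la t p acc1 acc2; simp [go]
  | cons l ld ih =>
    intro la t p acc1 acc2
    match la with
    | [] => simp [go, dayList]
    | a :: la' =>
      simp only [List.map_cons, dayList, List.zip_cons_cons, List.foldl_cons]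
      have hdd : t + (if PySem.Int.floordiv l 100 < p then 1 else 0)
          = (if PySem.Int.floordiv l 100 < p then t + 1 else t) := by
        split <;> ring
      rw [show altStep (acc1, acc2) (t + (if PySem.Int.floordiv l 100 < p then 1 else 0), (l, a))
          = (acc1 ++ [((t + (if PySem.Int.floordiv l 100 < p then 1 else 0)) * 24 + PySem.Int.floordiv l 100) * 60 + PySem.Int.mod l 100],
             acc2 ++ [(((t + (if PySem.Int.floordiv l 100 < p then 1 else 0)) * 24 + PySem.Int.floordiv a 100) * 60 + PySem.Int.mod a 100)
               + 1440 * max 0 (-(PySem.Int.floordiv ((((t + (if PySem.Int.floordiv l 100 < p then 1 else 0)) * 24 + PySem.Int.floordiv a 100) * 60 + PySem.Int.mod a 100)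
                   - (((t + (if PySem.Int.floordiv l 100 < p then 1 else 0)) * 24 + PySem.Int.floordiv l 100) * 60 + PySem.Int.mod l 100)) 1440))]) from rfl]
      rw [hdd, ih]
      simp only [go, ← preprWhile_eq]
      simp

-- ===== VERDICT (by name: the statement is the Claim_ definition above) =====
theorem prepr_spec : Claim_equal_prepr := by
  intro ld la _ hpre
  unfold Spec_prepr
  have hA := A_loop ld [] la 0 0 0 [] [] hpre
  simp only [List.length_nil, Nat.cast_zero, List.nil_append] at hA
  have hD := days_fold (ld.map (fun l => PySem.Int.floordiv l 100)) 0 0 []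
  simp only [List.nil_append] at hD
  show (((PySem.List.enumerate ld 0).foldl (preprStep la) (0,0,0,([]:List Int),([]:List Int))).2.2.2.1,
        ((PySem.List.enumerate ld 0).foldl (preprStep la) (0,0,0,([]:List Int),([]:List Int))).2.2.2.2)
      = (List.zip ((List.zip (0 :: ld.map (fun l => PySem.Int.floordiv l 100)) (ld.map (fun l => PySem.Int.floordiv l 100))).foldl altDayStep (0,([]:List Int))).2 (List.zip ld la)).foldl altStep (([]:List Int),([]:List Int))
  rw [hD, B_loop, hA]
  simp
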